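-- pv_equiv track=rewrite | github.com/SolAI-Protocol/solai-demo-client | utils.py | add_state_dict
-- ===== SOURCE A (Python) =====
-- def add_state_dict(state_dict1, state_dict2):
--     new_state_dict = {}
--     for key in state_dict1.keys():
--         if key in state_dict2:
--             new_state_dict[key] = state_dict1[key] + state_dict2[key]
--         else:
--             new_state_dict[key] = state_dict1[key]
--     return new_state_dict
-- ===== SOURCE B (Python) =====
-- def add_state_dict(state_dict1, state_dict2):
--     # stage 1: overlay of summed values for the overlapping keys
--     sums = {}
--     for key, value in state_dict2.items():
--         if key in state_dict1:
--             sums[key] = state_dict1[key] + value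
--     # stage 2: one mapping pass over dict1, defaulting to the original value
--     return {key: sums.get(key, value) for key, value in state_dict1.items()}
-- ===== Notes on version B (the rewrite author's own statement) =====
-- stated objective: alternative
-- what changed: B is two-staged: it first builds an auxiliary overlay dict of sums for the keys shared with dict1 by iterating dict2's items, then produces the result in a single mapping pass over dict1's items with sums.get(key, value); A instead builds the result dict directly in one branching loop over dict1's keys.
import Mathlib
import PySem

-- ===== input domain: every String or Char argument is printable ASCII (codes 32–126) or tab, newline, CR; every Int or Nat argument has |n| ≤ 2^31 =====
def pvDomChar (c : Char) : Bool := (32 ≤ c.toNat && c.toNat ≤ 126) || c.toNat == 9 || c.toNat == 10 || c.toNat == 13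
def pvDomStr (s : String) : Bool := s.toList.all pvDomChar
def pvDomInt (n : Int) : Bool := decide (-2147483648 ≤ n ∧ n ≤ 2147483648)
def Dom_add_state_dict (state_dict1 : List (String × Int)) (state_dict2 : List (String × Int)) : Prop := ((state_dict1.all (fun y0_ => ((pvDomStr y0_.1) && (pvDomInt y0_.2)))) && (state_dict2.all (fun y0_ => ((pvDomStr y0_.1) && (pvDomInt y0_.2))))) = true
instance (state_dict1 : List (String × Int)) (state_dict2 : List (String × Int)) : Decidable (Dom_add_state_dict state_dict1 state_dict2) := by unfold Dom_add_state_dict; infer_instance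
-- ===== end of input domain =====

-- B is two-staged: it builds an overlay dict of sums for the overlapping keys from dict2's
-- items, then maps once over dict1's items with a defaulted lookup; same cost, different algorithm.

-- ===== PORT A =====
-- A: new = {}; for key in d1: new[key] = d1[key] + d2[key] if key in d2 else d1[key]
def add_state_dict (state_dict1 : List (String × Int)) (state_dict2 : List (String × Int)) : List (String × Int) :=
  ((PySem.Dict.ofList state_dict1).keys.foldl
    (fun nd k =>
      if (PySem.Dict.ofList state_dict2).contains k then
        nd.insert k ((PySem.Dict.ofList state_dict1).getD k 0 + (PySem.Dict.ofList state_dict2).getD k 0)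
      else nd.insert k ((PySem.Dict.ofList state_dict1).getD k 0))
    PySem.Dict.empty).items

-- ===== PORT B =====
-- B: sums = {}; for key, value in d2.items(): if key in d1: sums[key] = d1[key] + value
--    return {key: sums.get(key, value) for key, value in d1.items()}
def add_state_dict_alt (state_dict1 : List (String × Int)) (state_dict2 : List (String × Int)) : List (String × Int) :=
  let d1 := PySem.Dict.ofList state_dict1
  let sums := (PySem.Dict.ofList state_dict2).items.foldl
    (fun s p => if d1.contains p.1 then s.insert p.1 (d1.getD p.1 0 + p.2) else s)
    (PySem.Dict.empty : PySem.Dict String Int)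
  d1.items.map (fun p => (p.1, sums.getD p.1 p.2))

-- ===== PRECONDITION & SPEC =====
def Spec_add_state_dict (state_dict1 : List (String × Int)) (state_dict2 : List (String × Int)) (out : List (String × Int)) : Prop := out = add_state_dict_alt state_dict1 state_dict2
instance (state_dict1 : List (String × Int)) (state_dict2 : List (String × Int)) (out : List (String × Int)) : Decidable (Spec_add_state_dict state_dict1 state_dict2 out) := by unfold Spec_add_state_dict; infer_instance

-- ===== CLAIM (what is proved, stated in full; the proofs are below) =====
def Claim_equal_add_state_dict : Prop := ∀ (state_dict1 : List (String × Int)) (state_dict2 : List (String × Int)), Dom_add_state_dict state_dict1 state_dict2 → Spec_add_state_dict state_dict1 state_dict2 (add_state_dict state_dict1 state_dict2)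

-- ===== LEMMAS AND PROOFS =====

-- the common per-key result value
def pvVal (d1 d2 : PySem.Dict String Int) (k : String) : Int :=
  if d2.contains k then d1.getD k 0 + d2.getD k 0 else d1.getD k 0

-- A's branching fold equals the single-insert fold of pvVal
theorem pvA_fold_eq (d1 d2 : PySem.Dict String Int) (L : List String) (acc : PySem.Dict String Int) :
    L.foldl (fun nd k => if d2.contains k then nd.insert k (d1.getD k 0 + d2.getD k 0)
                         else nd.insert k (d1.getD k 0)) acc
      = L.foldl (fun nd k => nd.insert k (pvVal d1 d2 k)) acc := by
  induction L generalizing acc with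
  | nil => rfl
  | cons a L ih =>
      simp only [List.foldl_cons, pvVal]
      split <;> exact ih _

-- B's stage-1 fold leaves the lookup at j untouched if j is not among the keys of L
theorem pvSums_notmem (d1 : PySem.Dict String Int) (L : List (String × Int))
    (acc : PySem.Dict String Int) (j : String) (dflt : Int)
    (h : j ∉ L.map Prod.fst) :
    (L.foldl (fun s p => if d1.contains p.1 then s.insert p.1 (d1.getD p.1 0 + p.2) else s) acc).getD j dflt
      = acc.getD j dflt := by
  induction L generalizing acc with
  | nil => rfl
  | cons p L ih =>
      simp only [List.map_cons, List.mem_cons, not_or] at h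
      simp only [List.foldl_cons]
      rw [ih _ h.2]
      split
      · exact PySem.Dict.getD_insert_of_ne _ _ _ h.1
      · rfl

-- B's stage-1 fold at a key (j, w) occurring in L (keys of L distinct)
theorem pvSums_mem (d1 : PySem.Dict String Int) (L : List (String × Int))
    (acc : PySem.Dict String Int) (j : String) (w : Int) (dflt : Int)
    (hnd : (L.map Prod.fst).Nodup) (hmem : (j, w) ∈ L) :
    (L.foldl (fun s p => if d1.contains p.1 then s.insert p.1 (d1.getD p.1 0 + p.2) else s) acc).getD j dflt
      = if d1.contains j then d1.getD j 0 + w else acc.getD j dflt := by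
  induction L generalizing acc with
  | nil => cases hmem
  | cons p L ih =>
      simp only [List.map_cons, List.nodup_cons] at hnd
      rcases List.mem_cons.mp hmem with rfl | hm
      · -- the head is (j, w); j does not occur in the tail's keys
        simp only [List.foldl_cons]
        rw [pvSums_notmem _ _ _ _ _ hnd.1]
        split
        · rw [PySem.Dict.getD_insert_self]
        · rfl
      · -- (j, w) is in the tail; the head's key differs from j
        have hne : p.1 ≠ j := fun he => hnd.1 (he ▸ List.mem_map_of_mem hm)
        simp only [List.foldl_cons]
        rw [ih _ hnd.2 hm]
        split
        · rfl
        · split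
          · exact PySem.Dict.getD_insert_of_ne _ _ _ (Ne.symm hne)
          · rfl

-- ===== VERDICT (by name: the statement is the Claim_ definition above) =====
theorem add_state_dict_spec : Claim_equal_add_state_dict := by
  intro l1 l2 _
  unfold Spec_add_state_dict add_state_dict add_state_dict_alt
  dsimp only
  set d1 := PySem.Dict.ofList l1 with hd1
  set d2 := PySem.Dict.ofList l2 with hd2
  have hnd1 : d1.keys.Nodup := PySem.Dict.nodup_keys_ofList l1
  have hnd2 : d2.keys.Nodup := PySem.Dict.nodup_keys_ofList l2
  -- A side: fresh distinct keys appended in the order of d1.keys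
  rw [pvA_fold_eq]
  have hA : (d1.keys.foldl (fun nd k => nd.insert k (pvVal d1 d2 k)) PySem.Dict.empty).items
      = (PySem.Dict.empty : PySem.Dict String Int).items ++ d1.keys.map (fun k => (k, pvVal d1 d2 k)) := by
    refine PySem.Dict.items_foldl_insert_fresh d1.keys id (pvVal d1 d2) _ ?_ (by simpa using hnd1)
    intro a _; exact PySem.Dict.contains_empty a
  rw [hA]
  have hEmpty : (PySem.Dict.empty : PySem.Dict String Int).items = [] := rfl
  rw [hEmpty, List.nil_append]
  -- B side: d1.items, listed by keys, mapped through the overlay lookup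
  rw [PySem.Dict.items_eq_map_keys d1 hnd1 0, List.map_map]
  refine List.map_congr_left ?_
  intro k hk
  have hk1 : d1.contains k = true := (PySem.Dict.contains_iff_mem_keys d1 k).mpr hk
  simp only [Function.comp]
  by_cases h2 : d2.contains k = true
  · -- k is in d2: (k, d2.getD k 0) is an item of d2
    have hsome : (d2.get? k).isSome := by
      rw [← PySem.Dict.contains_eq_isSome_get?]; exact h2
    obtain ⟨v, hv⟩ := Option.isSome_iff_exists.mp hsome
    have hvmem : (k, v) ∈ d2.items := PySem.Dict.mem_items_of_get?_eq_some _ hv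
    have hvD : d2.getD k 0 = v := PySem.Dict.getD_of_get?_eq_some _ _ hv
    have hndk : (d2.items.map Prod.fst).Nodup := hnd2
    rw [pvSums_mem d1 d2.items _ k v _ hndk hvmem, if_pos hk1]
    simp [pvVal, h2, hvD]
  · -- k is not in d2: the overlay never touched k, default = d1's own value
    have hnm : k ∉ d2.items.map Prod.fst := fun m =>
      h2 ((PySem.Dict.contains_iff_mem_keys d2 k).mpr m)
    rw [pvSums_notmem d1 d2.items _ k _ hnm]
    simp [pvVal, h2, PySem.Dict.getD_empty]
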